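-- pv_equiv track=rewrite | github.com/JaimeBallesterosCalvo/practica-2 | parte2/definitivo2.py | pacientesRecoger
-- ===== SOURCE A (Python) =====
-- def pacientesRecoger(datos):
--     #la función recorrera el mapa, guardando la dirección de donde están cada paciente y los hospitales
--     noContagiados= []
--     contagiados=[]
--     hospitalContagiado = []
--     hospitalNoContagiado = []
--     parking = []
--     contadorFila=-1
--     for fila in datos:
--         contadorFila+=1
--         contadorColumna=-1
--         for estado in fila:
--             contadorColumna+=1
--             if estado =="N":
--                 noContagiados.append([contadorFila, contadorColumna])
--             elif estado =="C":
--                 contagiados.append([contadorFila, contadorColumna ])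
--             elif estado =="CC":
--                 hospitalContagiado.append([contadorFila, contadorColumna ])
--             elif estado =="CN":
--                 hospitalNoContagiado.append([contadorFila, contadorColumna ])
--             elif estado == "P":
--                 parking.append([contadorFila, contadorColumna ])
--     totalPacientes=noContagiados+contagiados
--     return [totalPacientes, noContagiados, contagiados, hospitalContagiado, hospitalNoContagiado, parking]
-- ===== SOURCE B (Python) =====
-- def pacientesRecoger(datos):
--     def coords(key):
--         return [[i, j] for i, fila in enumerate(datos) for j, v in enumerate(fila) if v == key]
--     noContagiados, contagiados, hospitalContagiado, hospitalNoContagiado, parking = (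
--         coords("N"), coords("C"), coords("CC"), coords("CN"), coords("P"))
--     return [noContagiados + contagiados, noContagiados, contagiados,
--             hospitalContagiado, hospitalNoContagiado, parking]
-- ===== Notes on version B (the rewrite author's own statement) =====
-- stated objective: idiomatic
-- what changed: Replaces the single stateful pass with manual -1-initialised counters and a five-way if/elif dispatch by five enumerate-based filtered comprehensions, one per cell kind.
import Mathlib
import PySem

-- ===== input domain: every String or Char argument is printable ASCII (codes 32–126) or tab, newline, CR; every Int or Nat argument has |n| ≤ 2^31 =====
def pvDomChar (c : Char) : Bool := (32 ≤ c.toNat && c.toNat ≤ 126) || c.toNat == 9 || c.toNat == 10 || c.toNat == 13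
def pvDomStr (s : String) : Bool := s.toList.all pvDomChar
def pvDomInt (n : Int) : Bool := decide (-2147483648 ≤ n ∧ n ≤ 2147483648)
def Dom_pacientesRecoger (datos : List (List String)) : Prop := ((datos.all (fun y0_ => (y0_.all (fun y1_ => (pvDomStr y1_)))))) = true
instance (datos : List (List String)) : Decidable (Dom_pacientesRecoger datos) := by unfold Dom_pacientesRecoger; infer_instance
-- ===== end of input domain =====

-- B replaces A's stateful counter loop with five enumerate-based filtered comprehensions (idiomatic; same result).


-- ===== PORT A =====
-- the five accumulator lists, in declaration order: (noContagiados, contagiados, hospitalContagiado, hospitalNoContagiado, parking)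
abbrev AState := List (List Int) × List (List Int) × List (List Int) × List (List Int) × List (List Int)

-- body of the inner loop: counter is incremented at the top, then the if/elif chain appends
def aCell (i j : Int) (estado : String) (s : AState) : AState :=
  let (n, c, cc, cn, p) := s
  if estado == "N" then (n ++ [[i, j]], c, cc, cn, p)
  else if estado == "C" then (n, c ++ [[i, j]], cc, cn, p)
  else if estado == "CC" then (n, c, cc ++ [[i, j]], cn, p)
  else if estado == "CN" then (n, c, cc, cn ++ [[i, j]], p)
  else if estado == "P" then (n, c, cc, cn, p ++ [[i, j]])
  else (n, c, cc, cn, p)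

-- inner for-loop over fila, carrying contadorColumna (starts at -1, += 1 before each use)
def aRow (i : Int) (fila : List String) (j : Int) (s : AState) : AState :=
  match fila with
  | [] => s
  | estado :: rest => aRow i rest (j + 1) (aCell i (j + 1) estado s)

-- outer for-loop over datos, carrying contadorFila (starts at -1, += 1 before each row)
def aRows (datos : List (List String)) (i : Int) (s : AState) : AState :=
  match datos with
  | [] => s
  | fila :: rest => aRows rest (i + 1) (aRow (i + 1) fila (-1) s)

def pacientesRecoger (datos : List (List String)) : List (List (List Int)) :=
  let (n, c, cc, cn, p) := aRows datos (-1) ([], [], [], [], [])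
  let totalPacientes := n ++ c
  [totalPacientes, n, c, cc, cn, p]

-- ===== PORT B =====
-- coords(key): [[i, j] for i, fila in enumerate(datos) for j, v in enumerate(fila) if v == key]
def coordsB (datos : List (List String)) (key : String) : List (List Int) :=
  (PySem.List.enumerate datos).flatMap (fun if_ =>
    (PySem.List.enumerate if_.2).filterMap (fun jv =>
      if jv.2 == key then some [if_.1, jv.1] else none))

def pacientesRecoger_alt (datos : List (List String)) : List (List (List Int)) :=
  let noContagiados := coordsB datos "N"
  let contagiados := coordsB datos "C"
  let hospitalContagiado := coordsB datos "CC"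
  let hospitalNoContagiado := coordsB datos "CN"
  let parking := coordsB datos "P"
  [noContagiados ++ contagiados, noContagiados, contagiados,
   hospitalContagiado, hospitalNoContagiado, parking]

-- ===== PRECONDITION & SPEC =====
def Spec_pacientesRecoger (datos : List (List String)) (out : List (List (List Int))) : Prop := out = pacientesRecoger_alt datos
instance (datos : List (List String)) (out : List (List (List Int))) : Decidable (Spec_pacientesRecoger datos out) := by unfold Spec_pacientesRecoger; infer_instance

-- ===== CLAIM (what is proved, stated in full; the proofs are below) =====
def Claim_equal_pacientesRecoger : Prop := ∀ (datos : List (List String)), Dom_pacientesRecoger datos → Spec_pacientesRecoger datos (pacientesRecoger datos)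

-- ===== LEMMAS AND PROOFS =====

-- one row's contribution to one key, starting at column index j0
def rowCoords (i : Int) (fila : List String) (j0 : Int) (key : String) : List (List Int) :=
  (PySem.List.enumerate fila j0).filterMap (fun jv =>
    if jv.2 == key then some [i, jv.1] else none)

theorem rowCoords_nil (i j0 : Int) (key : String) : rowCoords i [] j0 key = [] := rfl

theorem rowCoords_cons (i j0 : Int) (e : String) (rest : List String) (key : String) :
    rowCoords i (e :: rest) j0 key =
      (if e == key then [[i, j0]] else []) ++ rowCoords i rest (j0 + 1) key := by
  simp only [rowCoords, PySem.List.enumerate_cons, List.filterMap_cons]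
  split <;> simp_all

-- invariant for the inner loop
theorem aRow_eq (i : Int) (fila : List String) : ∀ (j : Int) (n c cc cn p : List (List Int)),
    aRow i fila j (n, c, cc, cn, p) =
      (n ++ rowCoords i fila (j + 1) "N", c ++ rowCoords i fila (j + 1) "C",
       cc ++ rowCoords i fila (j + 1) "CC", cn ++ rowCoords i fila (j + 1) "CN",
       p ++ rowCoords i fila (j + 1) "P") := by
  induction fila with
  | nil => intro j n c cc cn p; simp [aRow, rowCoords_nil]
  | cons e rest ih =>
    intro j n c cc cn p
    simp only [aRow, aCell, rowCoords_cons]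
    by_cases h1 : e == "N" <;> by_cases h2 : e == "C" <;> by_cases h3 : e == "CC" <;>
      by_cases h4 : e == "CN" <;> by_cases h5 : e == "P" <;>
      simp_all [List.append_assoc]

-- whole-grid contribution of one key, rows enumerated from i0
def gridCoords (datos : List (List String)) (i0 : Int) (key : String) : List (List Int) :=
  (PySem.List.enumerate datos i0).flatMap (fun if_ => rowCoords if_.1 if_.2 0 key)

theorem gridCoords_cons (fila : List String) (rest : List (List String)) (i0 : Int) (key : String) :
    gridCoords (fila :: rest) i0 key = rowCoords i0 fila 0 key ++ gridCoords rest (i0 + 1) key := by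
  simp [gridCoords, PySem.List.enumerate_cons]

-- invariant for the outer loop
theorem aRows_eq (datos : List (List String)) : ∀ (i : Int) (n c cc cn p : List (List Int)),
    aRows datos i (n, c, cc, cn, p) =
      (n ++ gridCoords datos (i + 1) "N", c ++ gridCoords datos (i + 1) "C",
       cc ++ gridCoords datos (i + 1) "CC", cn ++ gridCoords datos (i + 1) "CN",
       p ++ gridCoords datos (i + 1) "P") := by
  induction datos with
  | nil => intro i n c cc cn p; simp [aRows, gridCoords, PySem.List.enumerate_nil]
  | cons fila rest ih =>
    intro i n c cc cn p
    have hrow := aRow_eq (i + 1) fila (-1) n c cc cn p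
    norm_num at hrow
    simp [aRows, hrow, ih, gridCoords_cons, List.append_assoc]

theorem coordsB_eq (datos : List (List String)) (key : String) :
    coordsB datos key = gridCoords datos 0 key := by
  simp [coordsB, gridCoords, rowCoords]

-- ===== VERDICT (by name: the statement is the Claim_ definition above) =====
theorem pacientesRecoger_spec : Claim_equal_pacientesRecoger := by
  intro datos _
  show pacientesRecoger datos = pacientesRecoger_alt datos
  have h := aRows_eq datos (-1) [] [] [] [] []
  norm_num at h
  simp [pacientesRecoger, pacientesRecoger_alt, h, coordsB_eq]
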